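-- pv_equiv track=rewrite | github.com/theappleboom/goal-list-training | GoalList.py | correctFileExtension
-- ===== SOURCE A (Python) =====
-- def correctFileExtension(filePath):
-- 	newFilePath = ""
-- 	splitOnSlashes = filePath.split('/')
-- 	splitOnPeriods = splitOnSlashes[len(splitOnSlashes)-1].split('.')
--
-- 	for i in range(0, len(splitOnSlashes) - 1):
-- 		newFilePath = newFilePath + splitOnSlashes[i] + "/"
--
-- 	newFilePath = newFilePath + splitOnPeriods[0] + ".csv"
-- 	return newFilePath
-- ===== SOURCE B (Python) =====
-- def correctFileExtension(filePath):
--     idx = filePath.rfind('/')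
--     prefix = filePath[:idx + 1]
--     name = filePath[idx + 1:]
--     return prefix + name.split('.')[0] + ".csv"
-- ===== Notes on version B (the rewrite author's own statement) =====
-- stated objective: simpler
-- what changed: Replaces the split-on-slash list build and the index-loop concatenation with a single rightmost-slash boundary lookup (rfind) plus two slices, keeping the first-period base-name rule.
import Mathlib
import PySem

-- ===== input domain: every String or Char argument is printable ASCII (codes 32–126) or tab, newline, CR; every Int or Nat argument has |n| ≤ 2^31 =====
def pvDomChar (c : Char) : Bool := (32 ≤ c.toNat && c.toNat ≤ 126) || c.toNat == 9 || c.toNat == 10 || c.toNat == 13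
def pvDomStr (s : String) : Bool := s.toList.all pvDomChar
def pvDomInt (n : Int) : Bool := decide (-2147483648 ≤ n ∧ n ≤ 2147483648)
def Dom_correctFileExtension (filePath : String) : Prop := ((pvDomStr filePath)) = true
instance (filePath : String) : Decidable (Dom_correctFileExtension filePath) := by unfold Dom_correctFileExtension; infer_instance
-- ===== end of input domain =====

-- B replaces A's split-on-slash list build and index-loop concatenation by one rightmost-slash boundary lookup (rfind) plus two slices (objective: simpler).

-- ===== PORT A =====
def correctFileExtension (filePath : String) : String :=
  let newFilePath : String := ""
  let splitOnSlashes := (PySem.Str.split? filePath "/").getD []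
  let splitOnPeriods := (PySem.Str.split? (PySem.List.pyGetD splitOnSlashes ((splitOnSlashes.length : Int) - 1) "") ".").getD []
  let newFilePath := (PySem.List.pyRange 0 ((splitOnSlashes.length : Int) - 1) 1).foldl
      (fun acc i => acc ++ PySem.List.pyGetD splitOnSlashes i "" ++ "/") newFilePath
  newFilePath ++ PySem.List.pyGetD splitOnPeriods 0 "" ++ ".csv"

-- ===== PORT B =====
def correctFileExtension_alt (filePath : String) : String :=
  let idx := PySem.Str.rfind filePath "/"
  let pre := PySem.Str.slice filePath none (some (idx + 1))
  let name := PySem.Str.slice filePath (some (idx + 1)) none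
  pre ++ PySem.List.pyGetD ((PySem.Str.split? name ".").getD []) 0 "" ++ ".csv"

-- ===== PRECONDITION & SPEC =====
def Spec_correctFileExtension (filePath : String) (out : String) : Prop := out = correctFileExtension_alt filePath
instance (filePath : String) (out : String) : Decidable (Spec_correctFileExtension filePath out) := by unfold Spec_correctFileExtension; infer_instance

-- ===== CLAIM (what is proved, stated in full; the proofs are below) =====
def Claim_equal_correctFileExtension : Prop := ∀ (filePath : String), Dom_correctFileExtension filePath → Spec_correctFileExtension filePath (correctFileExtension filePath)

-- ===== LEMMAS AND PROOFS =====

theorem mem_of_single_isPrefixOf {c : Char} {l : List Char}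
    (h : [c].isPrefixOf l = true) : c ∈ l := by
  cases l with
  | nil => simp [List.isPrefixOf] at h
  | cons x t =>
    simp [List.isPrefixOf] at h
    simp [h]

theorem go_splitOn (c : Char) :
    ∀ (fuel : Nat) (l cur : List Char) (acc : List (List Char)), l.length ≤ fuel →
      PySem.Chars.splitOn.go [c] fuel l cur acc
        = acc.reverse ++ (l.splitOnP (· == c)).modifyHead (cur.reverse ++ ·) := by
  intro fuel
  induction fuel with
  | zero =>
    intro l cur acc h
    have : l = [] := by cases l <;> simp at h ⊢
    subst this
    simp [PySem.Chars.splitOn.go, List.splitOnP_nil]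
  | succ fuel ih =>
    intro l cur acc h
    cases l with
    | nil => simp [PySem.Chars.splitOn.go, List.splitOnP_nil]
    | cons x t =>
      rw [PySem.Chars.splitOn.go]
      by_cases hx : c = x
      · subst hx
        simp only [List.isPrefixOf, BEq.rfl, Bool.true_and, if_true]
        rw [ih _ _ _ (by simpa using Nat.le_of_succ_le_succ (by simpa using h))]
        simp only [List.splitOnP_cons, BEq.rfl, if_true]
        cases hP : List.splitOnP (fun y => y == c) t <;> simp [hP]
      · have hpre : [c].isPrefixOf (x :: t) = false := by
          simp [List.isPrefixOf]
          exact fun h' => absurd h' hx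
        rw [hpre]
        simp only [if_false, Bool.false_eq_true]
        rw [ih _ _ _ (by simpa using Nat.le_of_succ_le_succ (by simpa using h))]
        rw [List.splitOnP_cons]
        have hxc : ((x == c) = false) := by
          simp
          exact fun e => hx e.symm
        rw [hxc]
        simp only [Bool.false_eq_true, if_false]
        cases hP : List.splitOnP (fun y => y == c) t with
        | nil => simp
        | cons p ps => simp

theorem splitOn_single (c : Char) (s : List Char) :
    PySem.Chars.splitOn s [c] = s.splitOnP (· == c) := by
  rw [PySem.Chars.splitOn, go_splitOn c (s.length + 1) s [] [] (by omega)]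
  cases h : s.splitOnP (· == c) <;> simp

theorem rfind_go_not_mem {c : Char} {s : List Char} (h : c ∉ s) :
    ∀ j : Nat, PySem.Chars.rfind.go s [c] j = -1 := by
  intro j
  induction j with
  | zero =>
    rw [PySem.Chars.rfind.go]
    have : [c].isPrefixOf s = false := by
      cases hp : [c].isPrefixOf s
      · rfl
      · exact absurd (mem_of_single_isPrefixOf hp) h
    simp [this]
  | succ j ih =>
    rw [PySem.Chars.rfind.go]
    have : [c].isPrefixOf (s.drop (j+1)) = false := by
      cases hp : [c].isPrefixOf (s.drop (j+1))
      · rfl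
      · exact absurd (List.mem_of_mem_drop (mem_of_single_isPrefixOf hp)) h
    simp [this, ih]

theorem rfind_not_mem {c : Char} {s : List Char} (h : c ∉ s) :
    PySem.Chars.rfind s [c] = -1 := rfind_go_not_mem h _

theorem rfind_go_last {c : Char} (a b : List Char) (h : c ∉ b) :
    ∀ d : Nat, a.length + d ≤ (a ++ c :: b).length →
      PySem.Chars.rfind.go (a ++ c :: b) [c] (a.length + d) = a.length := by
  intro d
  induction d with
  | zero =>
    intro _
    have hdrop : (a ++ c :: b).drop a.length = c :: b := by
      simp
    cases ha : a.length with
    | zero =>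
      rw [PySem.Chars.rfind.go]
      have : a = [] := List.length_eq_zero_iff.mp ha
      subst this
      simp [List.isPrefixOf]
    | succ k =>
      rw [PySem.Chars.rfind.go]
      have hd : (a ++ c :: b).drop (k+1) = c :: b := by
        rw [show k+1 = a.length from ha.symm]
        simp
      rw [hd]
      simp [List.isPrefixOf]
  | succ d ih =>
    intro hle
    have : a.length + (d+1) = (a.length + d) + 1 := by omega
    rw [this, PySem.Chars.rfind.go]
    have hdrop : (a ++ c :: b).drop (a.length + d + 1) = b.drop d := by
      have : a.length + d + 1 = a.length + (d + 1) := by omega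
      rw [this, List.drop_length_add_append]
      rfl
    rw [hdrop]
    have : [c].isPrefixOf (b.drop d) = false := by
      cases hp : [c].isPrefixOf (b.drop d)
      · rfl
      · exact absurd (List.mem_of_mem_drop (mem_of_single_isPrefixOf hp)) h
    simp only [this, Bool.false_eq_true, if_false]
    exact ih (by omega)

theorem rfind_last {c : Char} (a b : List Char) (h : c ∉ b) :
    PySem.Chars.rfind (a ++ c :: b) [c] = a.length := by
  rw [PySem.Chars.rfind]
  have : (a ++ c :: b).length = a.length + (b.length + 1) := by simp
  rw [this]
  exact rfind_go_last a b h _ (by simp)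

theorem flatten_map_append_single (c : Char) :
    ∀ L : List (List Char), L ≠ [] →
      (L.map (· ++ [c])).flatten = [c].intercalate L ++ [c] := by
  intro L
  induction L with
  | nil => intro h; exact absurd rfl h
  | cons p ps ih =>
    intro _
    cases ps with
    | nil => simp [List.intercalate]
    | cons q qs =>
      rw [List.map_cons, List.flatten_cons, ih (by simp)]
      simp [List.intercalate, List.intersperse_cons₂]

theorem slash_decomp (c : Char) (s : List Char) :
    c ∉ s ∨ ∃ a b, s = a ++ c :: b ∧ c ∉ b := by
  induction s using List.reverseRecOn with
  | nil => left; simp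
  | append_singleton t x ih =>
    by_cases hx : x = c
    · subst hx
      right
      exact ⟨t, [], by simp, by simp⟩
    · rcases ih with h | ⟨a, b, rfl, hb⟩
      · left
        simp [h]
        exact fun e => hx e.symm
      · right
        refine ⟨a, b ++ [x], by simp, ?_⟩
        simp [hb]
        exact fun e => hx e.symm

theorem foldl_range_getD (c : Char) (L : List (List Char)) :
    ∀ (m : Nat) (init : List Char), m ≤ L.length →
      (List.range m).foldl (fun acc i => acc ++ L.getD i [] ++ [c]) init
        = init ++ ((L.take m).map (· ++ [c])).flatten := by
  intro m
  induction m with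
  | zero => intro init _; simp
  | succ m ih =>
    intro init hm
    rw [List.range_succ, List.foldl_append]
    rw [ih init (by omega)]
    have hlt : m < L.length := by omega
    have : L.take (m+1) = L.take m ++ [L[m]] := by
      rw [List.take_add_one]
      simp [List.getElem?_eq_getElem hlt]
    rw [this, List.map_append, List.flatten_append]
    simp [List.getD_eq_getElem?_getD, List.getElem?_eq_getElem hlt]

theorem getD_map_ofList (P : List (List Char)) (k : Nat) :
    (P.map String.ofList).getD k "" = String.ofList (P.getD k []) := by
  by_cases hk : k < P.length
  · rw [List.getD_eq_getElem _ _ (by simpa using hk), List.getD_eq_getElem _ _ hk]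
    simp
  · rw [List.getD_eq_default _ _ (by simpa using Nat.le_of_not_lt hk),
        List.getD_eq_default _ _ (Nat.le_of_not_lt hk)]

theorem split_slashes_eq (fp : String) :
    (PySem.Str.split? fp "/").getD []
      = (fp.toList.splitOnP (· == '/')).map String.ofList := by
  rw [PySem.Str.split?]
  rw [show ("/" : String).toList = ['/'] from rfl]
  rw [PySem.Chars.split?]
  simp [splitOn_single]

-- ===== VERDICT (by name: the statement is the Claim_ definition above) =====
theorem correctFileExtension_spec : Claim_equal_correctFileExtension := by
  unfold Claim_equal_correctFileExtension
  intro fp _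
  unfold Spec_correctFileExtension correctFileExtension correctFileExtension_alt
  simp only [split_slashes_eq, PySem.Str.rfind_eq, show ("/" : String).toList = ['/'] from rfl]
  rcases slash_decomp '/' fp.toList with hnm | ⟨a, b, hs, hb⟩
  · -- no slash in fp
    have hP : fp.toList.splitOnP (· == '/') = [fp.toList] :=
      List.splitOnP_eq_single _ _ (fun x hx => by simp; rintro rfl; exact hnm hx)
    have hr : PySem.Chars.rfind fp.toList ['/'] = -1 := rfind_not_mem hnm
    rw [hP, hr]
    norm_num
    have h1 : PySem.Str.slice fp none (some 0) = "" := by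
      apply String.toList_inj.mp
      rw [PySem.Str.toList_slice, PySem.Chars.slice_eq_listSlice,
        PySem.List.slice_to fp.toList (by norm_num)]
      simp
    have h2 : PySem.Str.slice fp (some 0) = fp := by
      apply String.toList_inj.mp
      rw [PySem.Str.toList_slice, PySem.Chars.slice_eq_listSlice,
        PySem.List.slice_from fp.toList (by norm_num)]
      simp
    rw [h1, h2]
    simp
  · -- fp = a ++ '/' :: b with no slash in b
    have hr : PySem.Chars.rfind fp.toList ['/'] = a.length := hs ▸ rfind_last a b hb
    have hP : fp.toList.splitOnP (· == '/') = a.splitOnP (· == '/') ++ [b] := by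
      rw [hs, List.splitOnP_append_cons _ _ _ _ (by simp),
        show List.splitOnP (· == '/') b = [b] from
          List.splitOnP_eq_single _ _ (fun x hx => by simp; rintro rfl; exact hb hx)]
    rw [hP, hr]
    set Q := List.splitOnP (fun x => x == '/') a with hQ
    have hQne : Q ≠ [] := List.splitOnP_ne_nil _ a
    have hlen : ((Q ++ [b]).map String.ofList).length = Q.length + 1 := by simp
    rw [hlen]
    have hidx : ((Q.length + 1 : Nat) : Int) - 1 = ((Q.length : Nat) : Int) := by push_cast; ring
    rw [hidx, PySem.List.pyGetD_natCast, getD_map_ofList]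
    have hgetb : (Q ++ [b]).getD Q.length [] = b := by
      simp [List.getD_eq_getElem?_getD]
    rw [hgetb, PySem.List.pyRange_zero_natCast, List.foldl_map]
    simp only [PySem.List.pyGetD_natCast, getD_map_ofList]
    have hloop : List.foldl (fun acc (i : Nat) => acc ++ String.ofList ((Q ++ [b]).getD i []) ++ "/") "" (List.range Q.length)
        = PySem.Str.slice fp none (some ((a.length : Int) + 1)) := by
      apply String.toList_inj.mp
      rw [← List.foldl_hom String.toList
        (g₁ := fun acc (i : Nat) => acc ++ String.ofList ((Q ++ [b]).getD i []) ++ "/")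
        (g₂ := fun acc (i : Nat) => acc ++ (Q ++ [b]).getD i [] ++ ['/'])
        (by intro x y; simp)]
      rw [show String.toList "" = [] from rfl]
      rw [foldl_range_getD '/' (Q ++ [b]) Q.length [] (by simp), List.take_left]
      rw [flatten_map_append_single '/' Q hQne]
      rw [hQ, show List.splitOnP (fun x => x == '/') a = a.splitOn '/' from rfl,
        List.intercalate_splitOn]
      rw [PySem.Str.toList_slice, PySem.Chars.slice_eq_listSlice,
        PySem.List.slice_to fp.toList (by positivity)]
      rw [show ((a.length : Int) + 1).toNat = a.length + 1 by omega]
      rw [hs, List.take_length_add_append]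
      simp
    have hname : PySem.Str.slice fp (some ((a.length : Int) + 1)) = String.ofList b := by
      apply String.toList_inj.mp
      rw [PySem.Str.toList_slice, PySem.Chars.slice_eq_listSlice,
        PySem.List.slice_from fp.toList (by positivity)]
      rw [show ((a.length : Int) + 1).toNat = a.length + 1 by omega]
      rw [hs, List.drop_length_add_append, String.toList_ofList]
      rfl
    rw [hloop, hname]
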